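-- pv_equiv track=rewrite | github.com/polionus/oral-esl | rohingya-interpreter/src/rag.py | _deduplicate_ids
-- ===== SOURCE A (Python) =====
-- def _deduplicate_ids(ids: list[str]) -> list[str]:
--     """Ensure unique IDs by appending _1, _2, ... for duplicates."""
--     seen: dict[str, int] = {}
--     result = []
--     for id_ in ids:
--         if id_ not in seen:
--             seen[id_] = 0
--             result.append(id_)
--         else:
--             seen[id_] += 1
--             result.append(f"{id_}_{seen[id_]}")
--     return result
-- ===== SOURCE B (Python) =====
-- def _deduplicate_ids(ids: list[str]) -> list[str]:
--     """Ensure unique IDs by appending _1, _2, ... for duplicates."""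
--     groups: dict[str, list[int]] = {}
--     for i, id_ in enumerate(ids):
--         groups.setdefault(id_, []).append(i)
--     result = [""] * len(ids)
--     for id_, positions in groups.items():
--         result[positions[0]] = id_
--         for k, pos in enumerate(positions[1:], start=1):
--             result[pos] = f"{id_}_{k}"
--     return result
-- ===== Notes on version B (the rewrite author's own statement) =====
-- stated objective: alternative
-- what changed: Replaced A's single online pass with a running per-id counter by two staged passes: first group all positions by id into an index dict, then scatter-fill a preallocated result list group by group (first position of each id unchanged, k-th later position gets the _k suffix).
import Mathlib
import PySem

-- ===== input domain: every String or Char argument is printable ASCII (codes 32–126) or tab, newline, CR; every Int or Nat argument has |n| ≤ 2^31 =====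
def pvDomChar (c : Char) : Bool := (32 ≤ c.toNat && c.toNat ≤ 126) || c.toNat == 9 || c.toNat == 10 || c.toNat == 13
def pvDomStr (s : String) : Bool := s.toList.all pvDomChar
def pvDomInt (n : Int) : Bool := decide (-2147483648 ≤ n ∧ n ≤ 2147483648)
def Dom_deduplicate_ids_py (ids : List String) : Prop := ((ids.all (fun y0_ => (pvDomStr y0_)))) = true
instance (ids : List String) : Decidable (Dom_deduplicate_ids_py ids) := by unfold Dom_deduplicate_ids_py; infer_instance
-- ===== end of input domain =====

-- B replaces A's single online pass (running per-id counter) by two staged passes: group positions by id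
-- into an index dict, then scatter-fill a preallocated result list group by group; objective: alternative.

-- ===== PORT A =====
def deduplicate_ids_py (ids : List String) : List String :=
  (ids.foldl (fun st id_ =>
      if st.1.contains id_ = false then
        (st.1.insert id_ 0, st.2 ++ [id_])
      else
        let v := st.1.getD id_ 0 + 1
        (st.1.insert id_ v, st.2 ++ [id_ ++ "_" ++ PySem.Int.toStr v]))
    ((PySem.Dict.empty : PySem.Dict String Int), ([] : List String))).2

-- ===== PORT B =====
-- pass 1: groups.setdefault(id_, []).append(i)  over enumerate(ids)
-- pass 2: for each group, write the plain id at its first position and id_k at its k-th later position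
def deduplicate_ids_py_alt (ids : List String) : List String :=
  let groups := (PySem.List.enumerate ids).foldl
      (fun d p => d.modify p.2 ([] : List Int) (· ++ [p.1]))
      (PySem.Dict.empty : PySem.Dict String (List Int))
  groups.items.foldl (fun res kv =>
      match kv.2 with
      | [] => res
      | p0 :: rest =>
        (rest.foldl (fun st p =>
            (st.1.set p.toNat (kv.1 ++ "_" ++ PySem.Int.toStr st.2), st.2 + 1))
          (res.set p0.toNat kv.1, (1 : Int))).1)
    (List.replicate ids.length "")

-- ===== PRECONDITION & SPEC =====
def Spec_deduplicate_ids_py (ids : List String) (out : List String) : Prop := out = deduplicate_ids_py_alt ids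
instance (ids : List String) (out : List String) : Decidable (Spec_deduplicate_ids_py ids out) := by unfold Spec_deduplicate_ids_py; infer_instance

-- ===== CLAIM (what is proved, stated in full; the proofs are below) =====
def Claim_equal_deduplicate_ids_py : Prop := ∀ (ids : List String), Dom_deduplicate_ids_py ids → Spec_deduplicate_ids_py ids (deduplicate_ids_py ids)

-- ===== LEMMAS AND PROOFS =====

/-- the string produced for an occurrence of `x` whose preceding prefix is `pre` -/
def specF (pre : List String) (x : String) : String :=
  if pre.count x = 0 then x else x ++ "_" ++ PySem.Int.toStr ((pre.count x : Int))

/-- reference result for processing `tail` after the already-seen prefix `pre` -/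
def specList (pre tail : List String) : List String :=
  match tail with
  | [] => []
  | x :: t => specF pre x :: specList (pre ++ [x]) t

/-- invariant tying A's dict to the processed prefix -/
def SeenInv (seen : PySem.Dict String Int) (pre : List String) : Prop :=
  ∀ x, seen.get? x = if pre.count x = 0 then none else some ((pre.count x : Int) - 1)

lemma A_loop (tail : List String) : ∀ (pre acc : List String) (seen : PySem.Dict String Int),
    SeenInv seen pre →
    (tail.foldl (fun st id_ =>
        if st.1.contains id_ = false then
          (st.1.insert id_ 0, st.2 ++ [id_])
        else
          let v := st.1.getD id_ 0 + 1
          (st.1.insert id_ v, st.2 ++ [id_ ++ "_" ++ PySem.Int.toStr v]))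
      (seen, acc)).2 = acc ++ specList pre tail := by
  induction tail with
  | nil => intro pre acc seen _; simp [specList]
  | cons x t ih =>
    intro pre acc seen hinv
    have hx := hinv x
    simp only [List.foldl_cons]
    by_cases h0 : pre.count x = 0
    · have hcon : seen.contains x = false := by
        rw [PySem.Dict.contains_eq_isSome_get?, hx]; simp [h0]
      rw [if_pos (by simp [hcon])]
      have hinv' : SeenInv (seen.insert x 0) (pre ++ [x]) := by
        intro y
        rw [PySem.Dict.get?_insert]
        by_cases hyx : y = x
        · subst hyx; simp [List.count_append, h0]
        · have hxy : ¬ x = y := fun h => hyx h.symm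
          simp [List.count_append, hxy, hyx, hinv y]
      rw [ih (pre ++ [x]) (acc ++ [x]) _ hinv']
      simp [specList, specF, h0]
    · have hget : seen.get? x = some ((pre.count x : Int) - 1) := by rw [hx]; simp [h0]
      have hcon : seen.contains x = true := by
        rw [PySem.Dict.contains_eq_isSome_get?, hget]; rfl
      rw [if_neg (by simp [hcon])]
      have hgetD : seen.getD x 0 = (pre.count x : Int) - 1 := by
        rw [PySem.Dict.getD_eq_get?_getD, hget]; rfl
      have hinv' : SeenInv (seen.insert x (seen.getD x 0 + 1)) (pre ++ [x]) := by
        intro y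
        rw [PySem.Dict.get?_insert]
        by_cases hyx : y = x
        · subst hyx
          have : (pre ++ [y]).count y = pre.count y + 1 := by
            simp [List.count_append]
          rw [this]
          simp [hgetD]
        · have hxy : ¬ x = y := fun h => hyx h.symm
          simp [List.count_append, hxy, hyx, hinv y]
      rw [ih (pre ++ [x]) _ _ hinv']
      have hv : seen.getD x 0 + 1 = ((pre.count x : Int)) := by rw [hgetD]; ring
      simp [specList, specF, h0, hv]

lemma spec_length (tail : List String) : ∀ pre, (specList pre tail).length = tail.length := by
  induction tail with
  | nil => intro pre; simp [specList]
  | cons x t ih => intro pre; simp [specList, ih]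

lemma spec_getElem? (tail : List String) : ∀ (pre : List String) (j : Nat),
    (specList pre tail)[j]? = (tail[j]?).map (fun x => specF (pre ++ tail.take j) x) := by
  induction tail with
  | nil => intro pre j; simp [specList]
  | cons x t ih =>
    intro pre j
    cases j with
    | zero => simp [specList]
    | succ j =>
      simp only [specList, List.getElem?_cons_succ, List.take_succ_cons]
      rw [ih (pre ++ [x]) j]
      simp

/-- the scatter pairs produced for one group: first position plain, k-th later position suffixed -/
def pairsOf (x : String) (poss : List Int) : List (Nat × String) :=
  match poss with
  | [] => []
  | p0 :: rest => (p0.toNat, x) ::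
      (PySem.List.enumerate rest 1).map (fun kp => (kp.2.toNat, x ++ "_" ++ PySem.Int.toStr kp.1))

/-- the positions of `x` in `ids`, as produced by pass 1 -/
def occList (ids : List String) (x : String) : List Int :=
  ((PySem.List.enumerate ids).filter (fun q => q.2 == x)).map (·.1)

lemma inner_eq (x : String) (rest : List Int) : ∀ (c : Int) (res0 : List String),
    (rest.foldl (fun st p =>
        (st.1.set p.toNat (x ++ "_" ++ PySem.Int.toStr st.2), st.2 + 1))
      (res0, c)).1
    = ((PySem.List.enumerate rest c).map (fun kp => (kp.2.toNat, x ++ "_" ++ PySem.Int.toStr kp.1))).foldl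
        (fun r pv => r.set pv.1 pv.2) res0 := by
  induction rest with
  | nil => intro c res0; simp [PySem.List.enumerate_nil]
  | cons p rest ih =>
    intro c res0
    rw [PySem.List.enumerate_cons]
    simp only [List.foldl_cons, List.map_cons]
    exact ih (c + 1) _

lemma map_fst_pairsOf (x : String) (poss : List Int) :
    (pairsOf x poss).map (·.1) = poss.map (·.toNat) := by
  cases poss with
  | nil => simp [pairsOf]
  | cons p0 rest =>
    simp only [pairsOf, List.map_cons, List.map_map, List.map_cons]
    congr 1
    have h := PySem.List.map_snd_enumerate rest 1
    calc (PySem.List.enumerate rest 1).map ((·.1) ∘ fun kp => (kp.2.toNat, x ++ "_" ++ PySem.Int.toStr kp.1))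
        = ((PySem.List.enumerate rest 1).map (·.2)).map (·.toNat) := by
          rw [List.map_map]; rfl
      _ = rest.map (·.toNat) := by rw [h]

lemma pairsOf_mem (x : String) (poss : List Int) (pv : Nat × String) (h : pv ∈ pairsOf x poss) :
    ∃ (k : Nat) (p : Int), poss[k]? = some p ∧
      pv = (p.toNat, if k = 0 then x else x ++ "_" ++ PySem.Int.toStr (k : Int)) := by
  cases poss with
  | nil => simp [pairsOf] at h
  | cons p0 rest =>
    simp only [pairsOf, List.mem_cons] at h
    rcases h with h | h
    · exact ⟨0, p0, by simp, by simp [h]⟩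
    · rcases List.mem_map.1 h with ⟨kp, hkp, hpv⟩
      rcases (PySem.List.mem_enumerate_iff _ _ _).1 hkp with ⟨j, hj, hkpe⟩
      refine ⟨j + 1, rest[j], by simp [List.getElem?_cons_succ, List.getElem?_eq_getElem hj], ?_⟩
      subst hkpe hpv
      simp
      rw [Int.add_comm]

lemma occ_spec (ids : List String) : ∀ (s : Int) (x : String) (k : Nat) (p : Int),
    (((((PySem.List.enumerate ids s).filter (fun q => q.2 == x))).map (·.1))[k]? = some p) →
    ∃ j : Nat, p = s + j ∧ ids[j]? = some x ∧ (ids.take j).count x = k := by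
  induction ids with
  | nil => intro s x k p h; simp [PySem.List.enumerate_nil] at h
  | cons y t ih =>
    intro s x k p h
    rw [PySem.List.enumerate_cons] at h
    by_cases hyx : y = x
    · subst hyx
      rw [List.filter_cons_of_pos (by simp)] at h
      cases k with
      | zero =>
        simp only [List.map_cons, List.getElem?_cons_zero, Option.some.injEq] at h
        exact ⟨0, by omega, by simp, by simp⟩
      | succ k =>
        simp only [List.map_cons, List.getElem?_cons_succ] at h
        rcases ih (s + 1) y k p h with ⟨j, hp, hg, hc⟩
        refine ⟨j + 1, by push_cast at hp ⊢; omega, by simpa using hg, ?_⟩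
        simp [List.take_succ_cons, hc]
    · rw [List.filter_cons_of_neg (by simp [hyx])] at h
      rcases ih (s + 1) x k p h with ⟨j, hp, hg, hc⟩
      refine ⟨j + 1, by push_cast at hp ⊢; omega, by simpa using hg, ?_⟩
      simp [List.take_succ_cons, hc, hyx]

lemma scatter_getElem? (target : List String) (W : List (Nat × String)) :
    ∀ (init : List String), init.length = target.length →
    (∀ pv ∈ W, target[pv.1]? = some pv.2) →
    ∀ q, (W.foldl (fun r pv => r.set pv.1 pv.2) init)[q]? =
      if q ∈ W.map (·.1) then target[q]? else init[q]? := by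
  induction W with
  | nil => intro init _ _ q; simp
  | cons pv W ih =>
    intro init hlen hW q
    have hpv : target[pv.1]? = some pv.2 := hW pv (by simp)
    have hlt : pv.1 < target.length := by
      by_contra hge
      rw [List.getElem?_eq_none (by omega)] at hpv; simp at hpv
    rw [List.foldl_cons,
      ih (init.set pv.1 pv.2) (by simpa using hlen) (fun p hp => hW p (by simp [hp])) q]
    by_cases h1 : q ∈ W.map (·.1)
    · simp [h1]
    · by_cases h2 : q = pv.1
      · subst h2
        rw [if_neg h1, if_pos (by simp), List.getElem?_set_self (by omega), hpv]
      · rw [if_neg h1, List.getElem?_set_ne (fun h => h2 h.symm),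
          if_neg (by simp [h1, h2])]

lemma foldl_flatMap_set {α : Type} (l : List α) (g : α → List (Nat × String)) :
    ∀ (init : List String),
    (l.flatMap g).foldl (fun r pv => r.set pv.1 pv.2) init
      = l.foldl (fun acc a => (g a).foldl (fun r pv => r.set pv.1 pv.2) acc) init := by
  induction l with
  | nil => intro init; rfl
  | cons a l ih => intro init; rw [List.flatMap_cons, List.foldl_append, List.foldl_cons, ih]

lemma groups_getD (ids : List String) (x : String) :
    ((PySem.List.enumerate ids).foldl
      (fun d p => d.modify p.2 ([] : List Int) (· ++ [p.1]))
      (PySem.Dict.empty : PySem.Dict String (List Int))).getD x [] = occList ids x := by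
  rw [show ((PySem.List.enumerate ids).foldl
      (fun d p => d.modify p.2 ([] : List Int) (· ++ [p.1]))
      (PySem.Dict.empty : PySem.Dict String (List Int)))
    = (((PySem.List.enumerate ids).map Prod.swap).foldl
      (fun d q => d.modify q.1 ([] : List Int) (· ++ [q.2]))
      (PySem.Dict.empty : PySem.Dict String (List Int))) from by rw [List.foldl_map]; rfl]
  rw [PySem.Dict.getD_foldl_modify_append]
  rw [List.filter_map, List.map_map]
  simp only [PySem.Dict.getD_empty, List.nil_append, occList]
  rfl

lemma groups_keys (ids : List String) :
    ((PySem.List.enumerate ids).foldl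
      (fun d p => d.modify p.2 ([] : List Int) (· ++ [p.1]))
      (PySem.Dict.empty : PySem.Dict String (List Int))).keys = PySem.Set.ofList ids := by
  rw [PySem.Dict.keys_foldl_modify_key (PySem.List.enumerate ids) (·.2) []
    (fun _ p v => v ++ [p.1]) PySem.Dict.empty]
  rw [PySem.List.map_snd_enumerate]
  rfl

lemma B_eq_spec (ids : List String) : deduplicate_ids_py_alt ids = specList [] ids := by
  unfold deduplicate_ids_py_alt
  have hnd : ((PySem.List.enumerate ids).foldl
      (fun d p => d.modify p.2 ([] : List Int) (· ++ [p.1]))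
      (PySem.Dict.empty : PySem.Dict String (List Int))).keys.Nodup := by
    exact PySem.Dict.nodup_keys_foldl_modify_key (PySem.List.enumerate ids) (·.2) []
      (fun _ p v => v ++ [p.1]) PySem.Dict.empty (by simp [PySem.Dict.keys_empty])
  set groups := (PySem.List.enumerate ids).foldl
      (fun d p => d.modify p.2 ([] : List Int) (· ++ [p.1]))
      (PySem.Dict.empty : PySem.Dict String (List Int)) with hgroups
  have hitems : groups.items = (PySem.Set.ofList ids).map (fun x => (x, occList ids x)) := by
    rw [PySem.Dict.items_eq_map_keys groups hnd [], groups_keys ids]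
    exact List.map_congr_left (fun x _ => by rw [hgroups, groups_getD])
  -- rewrite each group body into a scatter fold over its pair list
  have hfun : (fun (res : List String) (kv : String × List Int) =>
      match kv.2 with
      | [] => res
      | p0 :: rest =>
        (rest.foldl (fun st p =>
            (st.1.set p.toNat (kv.1 ++ "_" ++ PySem.Int.toStr st.2), st.2 + 1))
          (res.set p0.toNat kv.1, (1 : Int))).1)
      = (fun res kv => (pairsOf kv.1 kv.2).foldl (fun r pv => r.set pv.1 pv.2) res) := by
    funext res kv
    rcases kv with ⟨x, poss⟩
    cases poss with
    | nil => rfl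
    | cons p0 rest =>
      simp only [pairsOf, List.foldl_cons]
      exact inner_eq x rest 1 (res.set p0.toNat x)
  rw [hfun, ← foldl_flatMap_set]
  -- the complete write list
  set W := groups.items.flatMap (fun kv => pairsOf kv.1 kv.2) with hW
  have hgood : ∀ pv ∈ W, (specList [] ids)[pv.1]? = some pv.2 := by
    intro pv hpv
    rcases List.mem_flatMap.1 hpv with ⟨kv, hkv, hmem⟩
    rw [hitems] at hkv
    rcases List.mem_map.1 hkv with ⟨x, _, hkve⟩
    subst hkve
    rcases pairsOf_mem x (occList ids x) pv hmem with ⟨k, p, hk, hpe⟩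
    rcases occ_spec ids 0 x k p hk with ⟨j, hpj, hg, hc⟩
    have hjlt : j < ids.length := by
      by_contra hge
      rw [List.getElem?_eq_none (by omega)] at hg; simp at hg
    have hpt : pv.1 = j := by rw [hpe]; simp; omega
    rw [hpt, spec_getElem? ids [] j, hg]
    simp only [List.nil_append, Option.map_some]
    congr 1
    rw [hpe]
    simp only [specF, hc]
  have hcov : ∀ q, q < ids.length → q ∈ W.map (·.1) := by
    intro q hq
    rw [hW, List.map_flatMap]
    refine List.mem_flatMap.2 ⟨(ids[q], occList ids (ids[q])), ?_, ?_⟩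
    · rw [hitems]
      exact List.mem_map.2 ⟨ids[q], (PySem.Set.mem_ofList ids ids[q]).2 (ids.getElem_mem hq), rfl⟩
    · rw [map_fst_pairsOf]
      refine List.mem_map.2 ⟨(q : Int), ?_, by simp⟩
      unfold occList
      refine List.mem_map.2 ⟨((q : Int), ids[q]), ?_, rfl⟩
      refine List.mem_filter.2 ⟨?_, by simp⟩
      exact (PySem.List.mem_enumerate_iff _ _ _).2 ⟨q, hq, by simp⟩
  apply List.ext_getElem?
  intro q
  rw [scatter_getElem? (specList [] ids) W (List.replicate ids.length "")
    (by simp [spec_length]) hgood q]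
  by_cases hq : q < ids.length
  · rw [if_pos (hcov q hq)]
  · have hnot : q ∉ W.map (·.1) := by
      intro hmem
      rcases List.mem_map.1 hmem with ⟨pv, hpv, hpe⟩
      have h2 := hgood pv hpv
      have h3 : pv.1 < (specList [] ids).length := by
        by_contra hge
        rw [List.getElem?_eq_none (by omega)] at h2; simp at h2
      rw [spec_length] at h3; omega
    rw [if_neg hnot, List.getElem?_eq_none (by simp; omega),
      List.getElem?_eq_none (by rw [spec_length]; omega)]

-- ===== VERDICT (by name: the statement is the Claim_ definition above) =====
theorem deduplicate_ids_py_spec : Claim_equal_deduplicate_ids_py := by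
  intro ids _
  unfold Spec_deduplicate_ids_py deduplicate_ids_py
  have hA := A_loop ids [] [] PySem.Dict.empty (by intro x; simp [PySem.Dict.get?_empty])
  simp only [List.nil_append] at hA
  rw [hA, B_eq_spec ids]
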